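-- pv_equiv track=rewrite | github.com/nahkh/aoc2015-py | day05.py | contains_two_consecutive_characters
-- ===== SOURCE A (Python) =====
-- def contains_two_consecutive_characters(line: str) -> bool:
--     # If the line is empty, return early
--     if not line:
--         return False
--     previous = line[0]
--     for i in range(1, len(line)):
--         next_char = line[i]
--         if next_char == previous:
--             return True
--         previous = next_char
--     return False
-- ===== SOURCE B (Python) =====
-- def contains_two_consecutive_characters(line: str) -> bool:
--     # Scan the string as maximal runs of identical characters;
--     # a run of length >= 2 means two consecutive equal characters.
--     i, n = 0, len(line)
--     while i < n:
--         j = i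
--         while j < n and line[j] == line[i]:
--             j += 1
--         if j - i >= 2:
--             return True
--         i = j
--     return False
-- ===== Notes on version B (the rewrite author's own statement) =====
-- stated objective: alternative
-- what changed: B partitions the string into maximal runs of identical characters and returns True iff some run has length >= 2, instead of A's previous-character pairwise comparison.
import Mathlib
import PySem

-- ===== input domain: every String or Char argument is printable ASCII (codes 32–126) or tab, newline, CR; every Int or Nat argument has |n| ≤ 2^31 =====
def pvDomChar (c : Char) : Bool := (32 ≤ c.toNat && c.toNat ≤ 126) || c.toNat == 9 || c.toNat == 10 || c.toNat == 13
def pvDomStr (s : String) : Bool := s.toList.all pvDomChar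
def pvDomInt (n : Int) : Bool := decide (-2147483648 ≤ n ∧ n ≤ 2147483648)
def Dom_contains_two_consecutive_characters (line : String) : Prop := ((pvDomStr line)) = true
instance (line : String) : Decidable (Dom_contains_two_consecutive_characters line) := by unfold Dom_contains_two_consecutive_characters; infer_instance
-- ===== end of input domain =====

-- B scans the string as maximal runs of identical characters instead of A's
-- previous-character pairwise comparison; same O(n) cost, different decomposition.

-- ===== PORT A =====
-- the for-loop over range(1, len(line)) carrying `previous`
def pvALoop (chars : List Char) (previous : Char) : Bool :=
  match chars with
  | [] => false
  | next_char :: rest =>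
    if next_char == previous then true else pvALoop rest next_char

def contains_two_consecutive_characters (line : String) : Bool :=
  match line.toList with
  | [] => false                    -- `if not line: return False`
  | previous :: rest => pvALoop rest previous

-- ===== PORT B =====
-- outer while-loop: take the maximal run starting at the head, test its length
def pvBLoop (chars : List Char) : Bool :=
  match chars with
  | [] => false
  | c :: rest =>
    let run := rest.takeWhile (· == c)   -- inner while-loop: extend the run
    if run.length + 1 ≥ 2 then true
    else pvBLoop (rest.dropWhile (· == c))
termination_by chars.length
decreasing_by
  simp only [List.length_cons]
  exact Nat.lt_succ_of_le (List.length_dropWhile_le _ _)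

def contains_two_consecutive_characters_alt (line : String) : Bool :=
  pvBLoop line.toList

-- ===== PRECONDITION & SPEC =====
def Spec_contains_two_consecutive_characters (line : String) (out : Bool) : Prop := out = contains_two_consecutive_characters_alt line
instance (line : String) (out : Bool) : Decidable (Spec_contains_two_consecutive_characters line out) := by unfold Spec_contains_two_consecutive_characters; infer_instance

-- ===== CLAIM (what is proved, stated in full; the proofs are below) =====
def Claim_equal_contains_two_consecutive_characters : Prop := ∀ (line : String), Dom_contains_two_consecutive_characters line → Spec_contains_two_consecutive_characters line (contains_two_consecutive_characters line)

-- ===== LEMMAS AND PROOFS =====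
theorem pvBLoop_eq_pvALoop (rest : List Char) (p : Char) :
    pvBLoop (p :: rest) = pvALoop rest p := by
  induction rest generalizing p with
  | nil => simp [pvBLoop, pvALoop]
  | cons c rs ih =>
    by_cases h : c == p
    · simp [pvBLoop, pvALoop, h, List.takeWhile]
    · have hb : pvBLoop (p :: c :: rs) = pvBLoop (c :: rs) := by
        rw [pvBLoop]
        simp [List.takeWhile, List.dropWhile, h]
      rw [hb, ih c]
      simp [pvALoop, h]

-- ===== VERDICT (by name: the statement is the Claim_ definition above) =====
theorem contains_two_consecutive_characters_spec : Claim_equal_contains_two_consecutive_characters := by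
  intro line _
  unfold Spec_contains_two_consecutive_characters
  unfold contains_two_consecutive_characters contains_two_consecutive_characters_alt
  cases h : line.toList with
  | nil => simp [pvBLoop]
  | cons p rest => exact (pvBLoop_eq_pvALoop rest p).symm
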